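-- pv_equiv track=rewrite | github.com/kh3dron/cta | mvp.py | get_overall_winner
-- ===== SOURCE A (Python) =====
-- def get_overall_winner(data):
--     votes = {}
--     for state in data:
--         for county in data[state]:
--             for party in data[state][county]:
--                 for candidate in data[state][county][party]:
--                     if candidate in votes:
--                         votes[candidate] += data[state][county][party][candidate]
--                     else:
--                         votes[candidate] = data[state][county][party][candidate]
--
--     winner = max(votes, key=votes.get)
--
--     if list(votes.values()).count(votes[winner]) > 1:
--         return "Tie between " + ", ".join([candidate for candidate in votes if votes[candidate] == votes[winner]])
--     else:
--         return winner
-- ===== SOURCE B (Python) =====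
-- def get_overall_winner(data):
--     # No running tally dict: flatten to a pair list, list the distinct
--     # candidates in first-seen order, and compute each candidate's total
--     # by summing its entries out of the flat list (group-by-filter).
--     pairs = [item
--              for counties in data.values()
--              for parties in counties.values()
--              for cands in parties.values()
--              for item in cands.items()]
--     order = []
--     for c, _ in pairs:
--         if c not in order:
--             order.append(c)
--     totals = [sum(n for c2, n in pairs if c2 == c) for c in order]
--     top = max(totals)
--     leaders = [c for c, t in zip(order, totals) if t == top]
--     if len(leaders) == 1:
--         return leaders[0]
--     return "Tie between " + ", ".join(leaders)
-- ===== Notes on version B (the rewrite author's own statement) =====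
-- stated objective: alternative
-- what changed: Drops A's running dict tally entirely: B flattens the nesting into one pair list, collects the distinct candidates in first-seen order into a plain list, computes each candidate's total by a per-candidate filter-and-sum over the flat list (group-by-filter, no map accumulator), and derives winner/tie by zipping candidates with totals against the maximum total instead of A's argmax-by-key plus a count of the top value.
import Mathlib
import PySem

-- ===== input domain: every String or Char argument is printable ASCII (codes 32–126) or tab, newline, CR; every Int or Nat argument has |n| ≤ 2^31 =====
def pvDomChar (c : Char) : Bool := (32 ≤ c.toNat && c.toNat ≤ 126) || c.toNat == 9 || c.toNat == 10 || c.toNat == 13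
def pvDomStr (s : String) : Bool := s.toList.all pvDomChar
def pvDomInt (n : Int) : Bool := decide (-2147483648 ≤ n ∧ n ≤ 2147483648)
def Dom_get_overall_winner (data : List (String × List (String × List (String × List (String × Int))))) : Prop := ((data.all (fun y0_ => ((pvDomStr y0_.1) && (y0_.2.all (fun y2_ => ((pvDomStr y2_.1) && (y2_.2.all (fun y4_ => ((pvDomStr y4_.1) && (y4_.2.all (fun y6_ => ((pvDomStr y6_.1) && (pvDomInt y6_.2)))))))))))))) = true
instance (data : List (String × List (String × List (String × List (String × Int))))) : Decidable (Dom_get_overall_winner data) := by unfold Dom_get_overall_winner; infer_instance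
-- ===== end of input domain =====

-- B drops A's running dict tally: it flattens the nesting, lists distinct candidates in
-- first-seen order, sums each candidate's entries out of the flat list (group-by-filter),
-- and picks winner/tie from the zipped (candidate, total) list (objective: alternative).

-- ===== PORT A =====
-- literal port: Python iterates dict keys and re-indexes; dict keys are unique, so
-- iterating the (key, value) pairs is exactly iterating keys with first-match lookup
def get_overall_winner (data : List (String × List (String × List (String × List (String × Int))))) : String :=
  let votes : PySem.Dict String Int :=
    data.foldl (fun v st =>
      st.2.foldl (fun v co =>
        co.2.foldl (fun v pa =>
          pa.2.foldl (fun v cand =>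
            if v.contains cand.1 then v.insert cand.1 (v.getD cand.1 0 + cand.2)
            else v.insert cand.1 cand.2) v) v) v) PySem.Dict.empty
  match votes.keys with
  | [] => ""  -- max() raises ValueError here; excluded by Pre_
  | k0 :: ks =>
    -- max(votes, key=votes.get): first key attaining the maximal count
    let winner := ks.foldl (fun w k => if votes.getD k 0 > votes.getD w 0 then k else w) k0
    let wv := votes.getD winner 0
    if PySem.List.count votes.values wv > 1 then
      "Tie between " ++ PySem.Str.join ", " (votes.keys.filter (fun c => votes.getD c 0 == wv))
    else winner

-- ===== PORT B =====
def get_overall_winner_alt (data : List (String × List (String × List (String × List (String × Int))))) : String :=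
  let pairs : List (String × Int) :=
    data.flatMap (fun st => st.2.flatMap (fun co => co.2.flatMap (fun pa => pa.2)))
  -- 'if c not in order: order.append(c)' over the list = PySem.Set.add
  let order : List String := pairs.foldl (fun s p => PySem.Set.add s p.1) []
  let totals : List Int :=
    order.map (fun c => ((pairs.filter (fun p => p.1 == c)).map Prod.snd).sum)
  match PySem.List.max? totals (fun x => x) with
  | none => ""  -- max() raises ValueError here; excluded by Pre_
  | some top =>
    let leaders := ((order.zip totals).filter (fun p => p.2 == top)).map Prod.fst
    if leaders.length == 1 then leaders.headD ""  -- leaders[0]; nonempty since top is attained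
    else "Tie between " ++ PySem.Str.join ", " leaders

-- ===== PRECONDITION & SPEC =====
-- Pre_ excludes exactly the inputs with no candidate at all (every innermost dict empty):
-- there both Pythons raise ValueError from max() on an empty sequence.
def Pre_get_overall_winner (data : List (String × List (String × List (String × List (String × Int))))) : Prop :=
  data.any (fun st => st.2.any (fun co => co.2.any (fun pa => !pa.2.isEmpty))) = true
instance (data : List (String × List (String × List (String × List (String × Int))))) : Decidable (Pre_get_overall_winner data) := by unfold Pre_get_overall_winner; infer_instance

def pvWitness_get_overall_winner : (List (String × List (String × List (String × List (String × Int))))) :=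
  [("ca", [("la", [("dem", [("alice", 3), ("bob", 2)])])])]

def Spec_get_overall_winner (data : List (String × List (String × List (String × List (String × Int))))) (out : String) : Prop := out = get_overall_winner_alt data
instance (data : List (String × List (String × List (String × List (String × Int))))) (out : String) : Decidable (Spec_get_overall_winner data out) := by unfold Spec_get_overall_winner; infer_instance

-- ===== CLAIM (what is proved, stated in full; the proofs are below) =====
def Claim_equal_get_overall_winner : Prop := ∀ (data : List (String × List (String × List (String × List (String × Int))))), Dom_get_overall_winner data → Pre_get_overall_winner data → Spec_get_overall_winner data (get_overall_winner data)

-- ===== LEMMAS AND PROOFS =====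

-- A's winner/tie phase as a function of the finished vote dict (lets inlined)
def pvPhaseA (d : PySem.Dict String Int) : String :=
  match d.keys with
  | [] => ""
  | k0 :: ks =>
    if PySem.List.count d.values
        (d.getD (ks.foldl (fun w k => if d.getD k 0 > d.getD w 0 then k else w) k0) 0) > 1 then
      "Tie between " ++ PySem.Str.join ", "
        (d.keys.filter (fun c =>
          d.getD c 0 == d.getD (ks.foldl (fun w k => if d.getD k 0 > d.getD w 0 then k else w) k0) 0))
    else ks.foldl (fun w k => if d.getD k 0 > d.getD w 0 then k else w) k0

-- B's winner/tie phase re-expressed over the same vote dict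
def pvPhaseB (d : PySem.Dict String Int) : String :=
  match PySem.List.max? d.values (fun x => x) with
  | none => ""
  | some top =>
    if ((d.items.filter (fun p => p.2 == top)).map (fun p => p.1)).length == 1 then
      ((d.items.filter (fun p => p.2 == top)).map (fun p => p.1)).headD ""
    else "Tie between " ++ PySem.Str.join ", " ((d.items.filter (fun p => p.2 == top)).map (fun p => p.1))

theorem pv_portA_phase (data : List (String × List (String × List (String × List (String × Int))))) :
    get_overall_winner data = pvPhaseA
      (data.foldl (fun v st =>
        st.2.foldl (fun v co =>
          co.2.foldl (fun v pa =>
            pa.2.foldl (fun v cand =>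
              if v.contains cand.1 then v.insert cand.1 (v.getD cand.1 0 + cand.2)
              else v.insert cand.1 cand.2) v) v) v) PySem.Dict.empty) := rfl

-- folding over a flatMap = the nested fold
theorem pv_foldl_flatMap {α β γ : Type} (l : List α) (g : α → List β) (f : γ → β → γ) (a : γ) :
    (l.flatMap g).foldl f a = l.foldl (fun acc x => (g x).foldl f acc) a := by
  induction l generalizing a with
  | nil => rfl
  | cons x t ih => simp [List.flatMap_cons, List.foldl_append, ih]

-- A's branching accumulation step is the unconditional insert-add step
theorem pv_step_eq (v : PySem.Dict String Int) (p : String × Int) :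
    (if v.contains p.1 then v.insert p.1 (v.getD p.1 0 + p.2) else v.insert p.1 p.2)
      = v.insert p.1 (v.getD p.1 0 + p.2) := by
  by_cases h : v.contains p.1 = true
  · simp [h]
  · simp only [Bool.not_eq_true] at h
    simp only [h, Bool.false_eq_true, if_false]
    rw [PySem.Dict.getD_of_not_contains v 0 h, zero_add]

-- A's nested fold builds the insert-add fold over the flattened pair list
theorem pv_votes_eq (data : List (String × List (String × List (String × List (String × Int))))) :
    data.foldl (fun v st =>
      st.2.foldl (fun v co =>
        co.2.foldl (fun v pa =>
          pa.2.foldl (fun v cand =>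
            if v.contains cand.1 then v.insert cand.1 (v.getD cand.1 0 + cand.2)
            else v.insert cand.1 cand.2) v) v) v) PySem.Dict.empty
    = (data.flatMap (fun st => st.2.flatMap (fun co => co.2.flatMap (fun pa => pa.2)))).foldl
        (fun v p => v.insert p.1 (v.getD p.1 0 + p.2)) PySem.Dict.empty := by
  simp only [pv_foldl_flatMap]
  have hstep : (fun (v : PySem.Dict String Int) (cand : String × Int) =>
      if v.contains cand.1 then v.insert cand.1 (v.getD cand.1 0 + cand.2)
      else v.insert cand.1 cand.2)
      = fun v p => v.insert p.1 (v.getD p.1 0 + p.2) := by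
    funext v p; exact pv_step_eq v p
  rw [hstep]

-- a lookup in the insert-add fold is the filter-sum over the pair list
theorem pv_getD_fold (l : List (String × Int)) (d : PySem.Dict String Int) (c : String) :
    (l.foldl (fun v p => v.insert p.1 (v.getD p.1 0 + p.2)) d).getD c 0
      = d.getD c 0 + ((l.filter (fun p => p.1 == c)).map Prod.snd).sum := by
  induction l generalizing d with
  | nil => simp
  | cons p t ih =>
    simp only [List.foldl_cons, List.filter_cons]
    by_cases h : p.1 = c
    · subst h
      rw [ih]
      simp [PySem.Dict.getD_insert_self]
      ring
    · have : (p.1 == c) = false := by simp [h]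
      rw [ih]
      simp only [this, Bool.false_eq_true, if_false]
      rw [PySem.Dict.getD_insert_of_ne _ _ _ (Ne.symm h)]

theorem pv_zip_map {α β : Type} (l : List α) (f : α → β) :
    l.zip (l.map f) = l.map (fun x => (x, f x)) := by
  induction l with
  | nil => rfl
  | cons x t ih => simp [ih]

-- B's dict-free computation equals pvPhaseB of the insert-add fold dict
theorem pv_portB_phase (data : List (String × List (String × List (String × List (String × Int))))) :
    get_overall_winner_alt data = pvPhaseB
      ((data.flatMap (fun st => st.2.flatMap (fun co => co.2.flatMap (fun pa => pa.2)))).foldl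
        (fun v p => v.insert p.1 (v.getD p.1 0 + p.2)) PySem.Dict.empty) := by
  simp only [get_overall_winner_alt, pvPhaseB]
  set pairs := data.flatMap (fun st => st.2.flatMap (fun co => co.2.flatMap (fun pa => pa.2))) with hp
  set d := pairs.foldl (fun v p => v.insert p.1 (v.getD p.1 0 + p.2)) PySem.Dict.empty with hd
  have hnd : d.keys.Nodup :=
    PySem.Dict.nodup_keys_foldl_insert_key _ Prod.fst _ _ PySem.Dict.nodup_keys_empty
  have horder : pairs.foldl (fun s p => PySem.Set.add s p.1) [] = d.keys := by
    rw [hd, PySem.Dict.keys_foldl_insert_key, PySem.Dict.keys_empty,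
      PySem.Set.update_nil_left, ← PySem.Set.update_nil_left (xs := pairs.map Prod.fst),
      PySem.Set.update_map_eq_foldl_add]
  have hgetD : ∀ c, ((pairs.filter (fun p => p.1 == c)).map Prod.snd).sum = d.getD c 0 := by
    intro c
    rw [hd, pv_getD_fold, PySem.Dict.getD_empty, zero_add]
  have hitems : (pairs.foldl (fun s p => PySem.Set.add s p.1) []).zip
      ((pairs.foldl (fun s p => PySem.Set.add s p.1) []).map
        (fun c => ((pairs.filter (fun p => p.1 == c)).map Prod.snd).sum)) = d.items := by
    rw [horder, pv_zip_map, PySem.Dict.items_eq_map_keys d hnd 0]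
    exact List.map_congr_left (fun c _ => by rw [hgetD c])
  have hvalues : (pairs.foldl (fun s p => PySem.Set.add s p.1) []).map
      (fun c => ((pairs.filter (fun p => p.1 == c)).map Prod.snd).sum) = d.values := by
    have h1 := congrArg (List.map Prod.snd) hitems
    rw [pv_zip_map, List.map_map] at h1
    simpa [PySem.Dict.values, Function.comp] using h1
  rw [hitems, hvalues]

-- the running argmax over the keys is the first pair attaining the running max of the values
theorem pv_argmax_first (g : String → Int) (l : List (String × Int)) (w : String × Int)
    (hg : ∀ p ∈ l, g p.1 = p.2) (hw : g w.1 = w.2) :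
    (l.map Prod.fst).foldl (fun a k => if g k > g a then k else a) w.1
      = (((w :: l).filter (fun p => p.2 == (l.map Prod.snd).foldl max w.2)).map Prod.fst).headD "" := by
  induction l generalizing w with
  | nil => simp
  | cons p t ih =>
    have hgp : g p.1 = p.2 := hg p (List.mem_cons_self ..)
    have hg' : ∀ q ∈ t, g q.1 = q.2 := fun q hq => hg q (List.mem_cons_of_mem _ hq)
    by_cases h : p.2 > w.2
    · have hstep : (if g p.1 > g w.1 then p.1 else w.1) = p.1 := by
        rw [hgp, hw]; simp [h]
      have hmax : max w.2 p.2 = p.2 := by omega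
      have hle : p.2 ≤ (t.map Prod.snd).foldl max p.2 := (PySem.List.le_foldl_max _ _).1
      have hwne : (w.2 == (t.map Prod.snd).foldl max p.2) = false := by simp; omega
      simp only [List.map_cons, List.foldl_cons, hstep, hmax, ih p hg' hgp]
      simp [List.filter_cons, hwne]
    · have hstep : (if g p.1 > g w.1 then p.1 else w.1) = w.1 := by
        rw [hgp, hw]; simp [h]
      have hmax : max w.2 p.2 = w.2 := by omega
      have := ih w hg' hw
      simp only [List.map_cons, List.foldl_cons, hstep, hmax] at this ⊢
      rw [this]
      by_cases hwm : w.2 = (t.map Prod.snd).foldl max w.2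
      · simp [List.filter_cons, ← hwm]
      · have hwle : w.2 ≤ (t.map Prod.snd).foldl max w.2 := (PySem.List.le_foldl_max _ _).1
        have hwne : (w.2 == (t.map Prod.snd).foldl max w.2) = false := by simp [hwm]
        have hpne : (p.2 == (t.map Prod.snd).foldl max w.2) = false := by
          simp; omega
        simp [hwne, hpne]

-- the running max is attained by some pair
theorem pv_max_mem (l : List (String × Int)) (w : String × Int) :
    ∃ q ∈ w :: l, q.2 = (l.map Prod.snd).foldl max w.2 := by
  rcases PySem.List.foldl_max_mem (l.map Prod.snd) w.2 with h | h
  · exact ⟨w, List.mem_cons_self .., h.symm⟩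
  · rcases List.mem_map.mp h with ⟨q, hq, hq2⟩
    exact ⟨q, List.mem_cons_of_mem _ hq, hq2⟩

-- the two phases agree on any vote dict with at least one entry
theorem pv_phase_eq (d : PySem.Dict String Int) (hnd : d.keys.Nodup) (hne : d.items ≠ []) :
    pvPhaseA d = pvPhaseB d := by
  rcases hit : d.items with _ | ⟨q, rest⟩
  · exact absurd hit hne
  have hgAll : ∀ p ∈ d.items, d.getD p.1 0 = p.2 := by
    intro p hp
    have hp' : (p.1, p.2) ∈ d.items := by simpa using hp
    exact PySem.Dict.getD_of_mem_items (h := hp') (hnd := hnd) (d0 := 0)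
  have hkeys : d.keys = q.1 :: rest.map Prod.fst := by
    simp only [PySem.Dict.keys, hit, List.map_cons]
  have hvals : d.values = q.2 :: rest.map Prod.snd := by
    simp only [PySem.Dict.values, hit, List.map_cons]
  have htop : PySem.List.max? d.values (fun x => x)
      = some ((rest.map Prod.snd).foldl max q.2) := by
    rw [hvals]; exact PySem.List.max?_id_cons _ _
  have hgq : d.getD q.1 0 = q.2 := hgAll q (by rw [hit]; exact List.mem_cons_self ..)
  have hgrest : ∀ p ∈ rest, d.getD p.1 0 = p.2 := fun p hp =>
    hgAll p (by rw [hit]; exact List.mem_cons_of_mem _ hp)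
  have hwin := pv_argmax_first (fun k => d.getD k 0) rest q hgrest hgq
  obtain ⟨p0, lrest, hlf⟩ : ∃ p0 lrest,
      (q :: rest).filter (fun p => p.2 == (rest.map Prod.snd).foldl max q.2) = p0 :: lrest := by
    obtain ⟨r, hrmem, hr2⟩ := pv_max_mem rest q
    have hrf : r ∈ (q :: rest).filter (fun p => p.2 == (rest.map Prod.snd).foldl max q.2) :=
      List.mem_filter.mpr ⟨hrmem, by simp [hr2]⟩
    rcases hcase : (q :: rest).filter (fun p => p.2 == (rest.map Prod.snd).foldl max q.2) with _ | ⟨a, b⟩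
    · rw [hcase] at hrf; cases hrf
    · exact ⟨a, b, hcase⟩
  have hp0 : p0 ∈ q :: rest ∧ p0.2 = (rest.map Prod.snd).foldl max q.2 := by
    have hmem : p0 ∈ (q :: rest).filter (fun p => p.2 == (rest.map Prod.snd).foldl max q.2) := by
      rw [hlf]; exact List.mem_cons_self ..
    have h2 := List.mem_filter.mp hmem
    exact ⟨h2.1, by simpa using h2.2⟩
  have hwv : d.getD p0.1 0 = (rest.map Prod.snd).foldl max q.2 := by
    rw [hgAll p0 (by rw [hit]; exact hp0.1), hp0.2]
  have hW : (rest.map Prod.fst).foldl (fun w k => if d.getD k 0 > d.getD w 0 then k else w) q.1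
      = p0.1 := by
    rw [hwin, hlf]; rfl
  have hcount : PySem.List.count d.values ((rest.map Prod.snd).foldl max q.2)
      = (p0 :: lrest).length := by
    rw [PySem.List.count_eq]
    have hv : d.values = d.items.map Prod.snd := by simp only [PySem.Dict.values]
    rw [hv, List.count, List.countP_map, List.countP_eq_length_filter, hit, ← hlf]
    rfl
  have hfilter : d.keys.filter (fun c => d.getD c 0 == (rest.map Prod.snd).foldl max q.2)
      = ((q :: rest).filter (fun p => p.2 == (rest.map Prod.snd).foldl max q.2)).map Prod.fst := by
    have hk : d.keys = d.items.map Prod.fst := by simp only [PySem.Dict.keys]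
    rw [hk, List.filter_map, hit]
    congr 1
    apply List.filter_congr
    intro p hp
    simp only [Function.comp_apply]
    rw [hgAll p (by rw [hit]; exact hp)]
  unfold pvPhaseA pvPhaseB
  simp only [hkeys, htop, hit]
  rw [hW, hwv, hcount]
  rw [hlf] at hfilter
  rw [hkeys] at hfilter
  rw [hfilter, hlf]
  rcases lrest with _ | ⟨r1, rrest⟩
  · simp
  · simp [List.length_map]

-- ===== VERDICT (by name: the statement is the Claim_ definition above) =====
theorem get_overall_winner_spec : Claim_equal_get_overall_winner := by
  intro data _ hpre
  unfold Spec_get_overall_winner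
  rw [pv_portA_phase, pv_votes_eq, pv_portB_phase]
  have hnd : ((data.flatMap (fun st => st.2.flatMap (fun co => co.2.flatMap (fun pa => pa.2)))).foldl
      (fun v p => v.insert p.1 (v.getD p.1 0 + p.2)) PySem.Dict.empty).keys.Nodup :=
    PySem.Dict.nodup_keys_foldl_insert_key _ Prod.fst _ _ PySem.Dict.nodup_keys_empty
  have hpne : data.flatMap (fun st => st.2.flatMap (fun co => co.2.flatMap (fun pa => pa.2))) ≠ [] := by
    unfold Pre_get_overall_winner at hpre
    simp only [List.any_eq_true, Bool.not_eq_eq_eq_not, Bool.not_true, List.isEmpty_eq_false_iff] at hpre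
    obtain ⟨st, hst, co, hco, pa, hpa, hcand⟩ := hpre
    rcases hpal : pa.2 with _ | ⟨c, cs⟩
    · exact absurd hpal hcand
    have : c ∈ data.flatMap (fun st => st.2.flatMap (fun co => co.2.flatMap (fun pa => pa.2))) := by
      refine List.mem_flatMap.mpr ⟨st, hst, ?_⟩
      refine List.mem_flatMap.mpr ⟨co, hco, ?_⟩
      refine List.mem_flatMap.mpr ⟨pa, hpa, ?_⟩
      rw [hpal]; exact List.mem_cons_self ..
    exact List.ne_nil_of_mem this
  have hne : ((data.flatMap (fun st => st.2.flatMap (fun co => co.2.flatMap (fun pa => pa.2)))).foldl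
      (fun v p => v.insert p.1 (v.getD p.1 0 + p.2)) PySem.Dict.empty).items ≠ [] := by
    intro h0
    have hk : ((data.flatMap (fun st => st.2.flatMap (fun co => co.2.flatMap (fun pa => pa.2)))).foldl
        (fun v p => v.insert p.1 (v.getD p.1 0 + p.2)) PySem.Dict.empty).keys = [] := by
      simp only [PySem.Dict.keys, h0, List.map_nil]
    rw [PySem.Dict.keys_foldl_insert_key] at hk
    rcases hpl : data.flatMap (fun st => st.2.flatMap (fun co => co.2.flatMap (fun pa => pa.2))) with _ | ⟨x, xs⟩
    · exact absurd hpl hpne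
    rw [hpl] at hk
    have hx : x.1 ∈ PySem.Set.update (PySem.Dict.empty : PySem.Dict String Int).keys ((x :: xs).map Prod.fst) := by
      rw [PySem.Dict.keys_empty, PySem.Set.update_nil_left, PySem.Set.mem_ofList]
      simp
    rw [hk] at hx
    cases hx
  exact pv_phase_eq _ hnd hne
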